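-- pv_equiv track=rewrite | github.com/zw0583228508/Muzikal | artifacts/music-ai-backend/audio/render_high_quality.py | _infer_stem_family
-- ===== SOURCE A (Python) =====
-- def _infer_stem_family(instrument: str) -> str:
--     """Map instrument name to stem family."""
--     inst = instrument.lower()
--     if any(k in inst for k in ("drum", "kick", "snare", "hat", "perc")):
--         return "drums"
--     if any(k in inst for k in ("bass",)):
--         return "bass"
--     if any(k in inst for k in ("vocal", "voice", "vox")):
--         return "vocals"
--     if any(k in inst for k in ("piano", "keys", "keyboard", "synth")):
--         return "keys"
--     if any(k in inst for k in ("guitar", "gtr")):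
--         return "guitars"
--     if any(k in inst for k in ("string", "violin", "viola", "cello", "orchestra")):
--         return "strings"
--     if any(k in inst for k in ("brass", "trumpet", "trombone", "horn")):
--         return "brass"
--     if any(k in inst for k in ("pad", "atmosphere", "ambient")):
--         return "pads"
--     return "other"
-- ===== SOURCE B (Python) =====
-- # One left-to-right scan over the name with a best-priority accumulator:
-- # at each position, any keyword that starts there lowers the current best
-- # priority; the family of the minimal matched priority wins.
-- _KEYWORDS = [
--     ("drum", 0, "drums"), ("kick", 0, "drums"), ("snare", 0, "drums"),
--     ("hat", 0, "drums"), ("perc", 0, "drums"),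
--     ("bass", 1, "bass"),
--     ("vocal", 2, "vocals"), ("voice", 2, "vocals"), ("vox", 2, "vocals"),
--     ("piano", 3, "keys"), ("keys", 3, "keys"), ("keyboard", 3, "keys"),
--     ("synth", 3, "keys"),
--     ("guitar", 4, "guitars"), ("gtr", 4, "guitars"),
--     ("string", 5, "strings"), ("violin", 5, "strings"), ("viola", 5, "strings"),
--     ("cello", 5, "strings"), ("orchestra", 5, "strings"),
--     ("brass", 6, "brass"), ("trumpet", 6, "brass"), ("trombone", 6, "brass"),
--     ("horn", 6, "brass"),
--     ("pad", 7, "pads"), ("atmosphere", 7, "pads"), ("ambient", 7, "pads"),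
-- ]
--
--
-- def _infer_stem_family(instrument: str) -> str:
--     """Map instrument name to stem family."""
--     inst = instrument.lower()
--     best_pri, best_fam = 8, "other"
--     for i in range(len(inst)):
--         for kw, pri, fam in _KEYWORDS:
--             if pri < best_pri and inst.startswith(kw, i):
--                 best_pri, best_fam = pri, fam
--     return best_fam
-- ===== Notes on version B (the rewrite author's own statement) =====
-- stated objective: alternative
-- what changed: Replaces the eight-branch substring-membership cascade (one scan per keyword) with a single left-to-right scan over the string that checks at each position which keywords start there and keeps the minimum family priority in an accumulator.
import Mathlib
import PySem

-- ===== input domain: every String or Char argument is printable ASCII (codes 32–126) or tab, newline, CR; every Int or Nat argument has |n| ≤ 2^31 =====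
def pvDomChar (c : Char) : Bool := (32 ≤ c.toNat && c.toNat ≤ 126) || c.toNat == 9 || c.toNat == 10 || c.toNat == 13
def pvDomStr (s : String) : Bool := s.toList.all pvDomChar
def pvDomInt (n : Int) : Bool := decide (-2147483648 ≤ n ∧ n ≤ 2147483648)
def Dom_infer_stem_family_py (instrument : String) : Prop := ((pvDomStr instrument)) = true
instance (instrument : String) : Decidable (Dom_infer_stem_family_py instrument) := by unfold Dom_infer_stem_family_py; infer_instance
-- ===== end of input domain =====

-- B replaces A's per-keyword substring cascade by a single positional scan with a
-- minimum-priority accumulator (alternative algorithm, same asymptotic cost).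

-- ===== PORT A =====
def infer_stem_family_py (instrument : String) : String :=
  let inst := PySem.Str.lower instrument
  if (["drum", "kick", "snare", "hat", "perc"] : List String).any (fun k => PySem.Str.isIn k inst) then "drums"
  else if (["bass"] : List String).any (fun k => PySem.Str.isIn k inst) then "bass"
  else if (["vocal", "voice", "vox"] : List String).any (fun k => PySem.Str.isIn k inst) then "vocals"
  else if (["piano", "keys", "keyboard", "synth"] : List String).any (fun k => PySem.Str.isIn k inst) then "keys"
  else if (["guitar", "gtr"] : List String).any (fun k => PySem.Str.isIn k inst) then "guitars"
  else if (["string", "violin", "viola", "cello", "orchestra"] : List String).any (fun k => PySem.Str.isIn k inst) then "strings"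
  else if (["brass", "trumpet", "trombone", "horn"] : List String).any (fun k => PySem.Str.isIn k inst) then "brass"
  else if (["pad", "atmosphere", "ambient"] : List String).any (fun k => PySem.Str.isIn k inst) then "pads"
  else "other"

-- ===== PORT B =====
-- _KEYWORDS: (keyword as code points, priority, family)
def pvKeywords : List (List Char × Nat × String) :=
  [("drum".toList, 0, "drums"), ("kick".toList, 0, "drums"), ("snare".toList, 0, "drums"),
   ("hat".toList, 0, "drums"), ("perc".toList, 0, "drums"),
   ("bass".toList, 1, "bass"),
   ("vocal".toList, 2, "vocals"), ("voice".toList, 2, "vocals"), ("vox".toList, 2, "vocals"),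
   ("piano".toList, 3, "keys"), ("keys".toList, 3, "keys"), ("keyboard".toList, 3, "keys"),
   ("synth".toList, 3, "keys"),
   ("guitar".toList, 4, "guitars"), ("gtr".toList, 4, "guitars"),
   ("string".toList, 5, "strings"), ("violin".toList, 5, "strings"), ("viola".toList, 5, "strings"),
   ("cello".toList, 5, "strings"), ("orchestra".toList, 5, "strings"),
   ("brass".toList, 6, "brass"), ("trumpet".toList, 6, "brass"), ("trombone".toList, 6, "brass"),
   ("horn".toList, 6, "brass"),
   ("pad".toList, 7, "pads"), ("atmosphere".toList, 7, "pads"), ("ambient".toList, 7, "pads")]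

-- inner loop body: `if pri < best_pri and inst.startswith(kw, i)` — for
-- 0 ≤ i, Python's startswith(kw, i) is exactly `kw.isPrefixOf (inst.drop i)`
def pvStepKw (suffix : List Char) (b : Nat × String) (e : List Char × Nat × String) : Nat × String :=
  if e.2.1 < b.1 ∧ e.1.isPrefixOf suffix then (e.2.1, e.2.2) else b

-- one iteration of the outer `for i in range(len(inst))` loop
def pvScanIdx (inst : List Char) (b : Nat × String) (i : Nat) : Nat × String :=
  pvKeywords.foldl (pvStepKw (inst.drop i)) b

def infer_stem_family_py_alt (instrument : String) : String :=
  let inst := (PySem.Str.lower instrument).toList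
  ((List.range inst.length).foldl (pvScanIdx inst) (8, "other")).2

-- ===== PRECONDITION & SPEC =====
def Spec_infer_stem_family_py (instrument : String) (out : String) : Prop := out = infer_stem_family_py_alt instrument
instance (instrument : String) (out : String) : Decidable (Spec_infer_stem_family_py instrument out) := by unfold Spec_infer_stem_family_py; infer_instance

-- ===== CLAIM (what is proved, stated in full; the proofs are below) =====
def Claim_equal_infer_stem_family_py : Prop := ∀ (instrument : String), Dom_infer_stem_family_py instrument → Spec_infer_stem_family_py instrument (infer_stem_family_py instrument)

-- ===== LEMMAS AND PROOFS =====

def pvFamName : Nat → String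
  | 0 => "drums" | 1 => "bass" | 2 => "vocals" | 3 => "keys"
  | 4 => "guitars" | 5 => "strings" | 6 => "brass" | 7 => "pads"
  | _ => "other"

def pvGroup : Nat → List String
  | 0 => ["drum", "kick", "snare", "hat", "perc"]
  | 1 => ["bass"]
  | 2 => ["vocal", "voice", "vox"]
  | 3 => ["piano", "keys", "keyboard", "synth"]
  | 4 => ["guitar", "gtr"]
  | 5 => ["string", "violin", "viola", "cello", "orchestra"]
  | 6 => ["brass", "trumpet", "trombone", "horn"]
  | 7 => ["pad", "atmosphere", "ambient"]
  | _ => []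

def pvCond (s : String) (q : Nat) : Bool := (pvGroup q).any (fun k => PySem.Str.isIn k s)

-- table facts
set_option maxHeartbeats 2000000 in
lemma pvKeywords_fam : ∀ e ∈ pvKeywords, e.2.2 = pvFamName e.2.1 := by decide

set_option maxHeartbeats 2000000 in
lemma pvKeywords_ne_nil : ∀ e ∈ pvKeywords, e.1 ≠ [] := by decide

set_option maxHeartbeats 4000000 in
lemma pvKeywords_group : ∀ e ∈ pvKeywords, ∃ k ∈ pvGroup e.2.1, k.toList = e.1 := by decide

set_option maxHeartbeats 4000000 in
lemma pvGroup_keywords : ∀ q ≤ 7, ∀ k ∈ pvGroup q, (k.toList, q, pvFamName q) ∈ pvKeywords := by decide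

lemma pv_inner_spec (suffix : List Char) :
    ∀ (K : List (List Char × Nat × String)) (b : Nat × String),
      (∀ e ∈ K, e.2.2 = pvFamName e.2.1) → b.2 = pvFamName b.1 →
      (K.foldl (pvStepKw suffix) b).2 = pvFamName (K.foldl (pvStepKw suffix) b).1 ∧
      (K.foldl (pvStepKw suffix) b).1 ≤ b.1 ∧
      ((K.foldl (pvStepKw suffix) b).1 = b.1 ∨
        ∃ e ∈ K, e.2.1 = (K.foldl (pvStepKw suffix) b).1 ∧ e.1.isPrefixOf suffix = true) ∧
      (∀ e ∈ K, e.1.isPrefixOf suffix = true → (K.foldl (pvStepKw suffix) b).1 ≤ e.2.1) := by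
  intro K
  induction K with
  | nil => intro b _ hb; simp [hb]
  | cons e K ih =>
    intro b hK hb
    have hKr : ∀ e' ∈ K, e'.2.2 = pvFamName e'.2.1 := fun e' h => hK e' (List.mem_cons_of_mem _ h)
    by_cases hc : e.2.1 < b.1 ∧ e.1.isPrefixOf suffix
    · have hstep : pvStepKw suffix b e = (e.2.1, e.2.2) := by
        simp only [pvStepKw]; rw [if_pos hc]
      have hb' : (e.2.1, e.2.2).2 = pvFamName (e.2.1, e.2.2).1 := hK e List.mem_cons_self
      obtain ⟨h1, h2, h3, h4⟩ := ih (e.2.1, e.2.2) hKr hb'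
      simp only [List.foldl_cons, hstep] at *
      refine ⟨h1, le_trans h2 (le_of_lt hc.1), ?_, ?_⟩
      · rcases h3 with h3 | ⟨e', he', h3⟩
        · exact Or.inr ⟨e, List.mem_cons_self, by simpa using h3.symm, hc.2⟩
        · exact Or.inr ⟨e', List.mem_cons_of_mem _ he', h3⟩
      · intro e' he' hp
        rcases List.mem_cons.mp he' with rfl | he'
        · exact h2
        · exact h4 e' he' hp
    · have hstep : pvStepKw suffix b e = b := by
        simp only [pvStepKw]; rw [if_neg hc]
      obtain ⟨h1, h2, h3, h4⟩ := ih b hKr hb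
      simp only [List.foldl_cons, hstep] at *
      refine ⟨h1, h2, ?_, ?_⟩
      · rcases h3 with h3 | ⟨e', he', h3⟩
        · exact Or.inl h3
        · exact Or.inr ⟨e', List.mem_cons_of_mem _ he', h3⟩
      · intro e' he' hp
        rcases List.mem_cons.mp he' with rfl | he'
        · -- e' itself matches but was not taken: then b.1 ≤ e'.2.1
          have hnl : ¬ e'.2.1 < b.1 := fun hlt => hc ⟨hlt, hp⟩
          exact le_trans h2 (not_lt.mp hnl)
        · exact h4 e' he' hp

lemma pv_outer_spec (inst : List Char) :
    ∀ (idxs : List Nat) (b : Nat × String), b.2 = pvFamName b.1 →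
      (idxs.foldl (pvScanIdx inst) b).2 = pvFamName (idxs.foldl (pvScanIdx inst) b).1 ∧
      (idxs.foldl (pvScanIdx inst) b).1 ≤ b.1 ∧
      ((idxs.foldl (pvScanIdx inst) b).1 = b.1 ∨
        ∃ i ∈ idxs, ∃ e ∈ pvKeywords, e.2.1 = (idxs.foldl (pvScanIdx inst) b).1 ∧
          e.1.isPrefixOf (inst.drop i) = true) ∧
      (∀ i ∈ idxs, ∀ e ∈ pvKeywords, e.1.isPrefixOf (inst.drop i) = true →
        (idxs.foldl (pvScanIdx inst) b).1 ≤ e.2.1) := by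
  intro idxs
  induction idxs with
  | nil => intro b hb; simp [hb]
  | cons i idxs ih =>
    intro b hb
    obtain ⟨g1, g2, g3, g4⟩ := pv_inner_spec (inst.drop i) pvKeywords b pvKeywords_fam hb
    obtain ⟨h1, h2, h3, h4⟩ := ih (pvKeywords.foldl (pvStepKw (inst.drop i)) b) g1
    have hfold : (i :: idxs).foldl (pvScanIdx inst) b
        = idxs.foldl (pvScanIdx inst) (pvKeywords.foldl (pvStepKw (inst.drop i)) b) := by
      rw [List.foldl_cons]; rfl
    rw [hfold]
    refine ⟨h1, le_trans h2 g2, ?_, ?_⟩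
    · rcases h3 with h3 | ⟨j, hj, e, he, h3⟩
      · rw [h3]
        rcases g3 with g3 | ⟨e, he, g3, gp⟩
        · exact Or.inl g3
        · exact Or.inr ⟨i, List.mem_cons_self, e, he, g3, gp⟩
      · exact Or.inr ⟨j, List.mem_cons_of_mem _ hj, e, he, h3⟩
    · intro j hj e he hp
      rcases List.mem_cons.mp hj with rfl | hj
      · exact le_trans h2 (g4 e he hp)
      · exact h4 j hj e he hp

-- a prefix of a drop is an infix
lemma pv_prefix_drop_infix {kw s : List Char} {i : Nat} (h : kw.isPrefixOf (s.drop i) = true) :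
    kw <:+: s :=
  ((List.isPrefixOf_iff_prefix.mp h).isInfix).trans (s.drop_suffix i).isInfix

-- an infix occurrence of a nonempty keyword happens at some index < length
lemma pv_infix_prefix_drop {kw s : List Char} (hne : kw ≠ []) (h : kw <:+: s) :
    ∃ i ∈ List.range s.length, kw.isPrefixOf (s.drop i) = true := by
  obtain ⟨j, hj⟩ := (PySem.Chars.exists_prefix_drop_iff_isIn kw s).mpr
    ((PySem.Chars.isIn_iff_infix kw s).mpr h)
  refine ⟨j, List.mem_range.mpr ?_, List.isPrefixOf_iff_prefix.mpr hj⟩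
  by_contra hge
  have hdrop : s.drop j = [] := List.drop_eq_nil_of_le (le_of_not_gt hge)
  rw [hdrop] at hj
  exact hne (List.prefix_nil.mp hj)

-- condition q true ⇒ the scan's final priority is ≤ q
lemma pv_cond_le (s : String) (q : Nat) (hq : q ≤ 7) (hc : pvCond s q = true) :
    ((List.range s.toList.length).foldl (pvScanIdx s.toList) (8, "other")).1 ≤ q := by
  obtain ⟨k, hk, hin⟩ := List.any_eq_true.mp hc
  have hinf : k.toList <:+: s.toList := (PySem.Str.isIn_iff_infix k s).mp hin
  have hne : k.toList ≠ [] := by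
    have := pvKeywords_ne_nil (k.toList, q, pvFamName q) (pvGroup_keywords q hq k hk)
    simpa using this
  obtain ⟨i, hi, hp⟩ := pv_infix_prefix_drop hne hinf
  have h4 := (pv_outer_spec s.toList (List.range s.toList.length) (8, "other") rfl).2.2.2
  exact h4 i hi (k.toList, q, pvFamName q) (pvGroup_keywords q hq k hk) hp

-- the scan's final priority is 8 or its condition holds
lemma pv_matched (s : String) :
    ((List.range s.toList.length).foldl (pvScanIdx s.toList) (8, "other")).1 = 8 ∨
    pvCond s ((List.range s.toList.length).foldl (pvScanIdx s.toList) (8, "other")).1 = true := by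
  rcases (pv_outer_spec s.toList (List.range s.toList.length) (8, "other") rfl).2.2.1 with
    h | ⟨i, _, e, he, hq, hp⟩
  · exact Or.inl h
  · right
    obtain ⟨k, hk, hkk⟩ := pvKeywords_group e he
    refine List.any_eq_true.mpr ⟨k, by rwa [hq] at hk, ?_⟩
    refine (PySem.Str.isIn_iff_infix k s).mpr ?_
    rw [hkk]
    exact pv_prefix_drop_infix hp

-- A's if-cascade returns pvFamName of the least matched priority
lemma pv_cascade_eq (s : String) (n : Nat) (hle : n ≤ 8)
    (hmatch : n = 8 ∨ pvCond s n = true)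
    (hmin : ∀ q, q ≤ 7 → pvCond s q = true → n ≤ q) :
    (if pvCond s 0 then "drums" else if pvCond s 1 then "bass" else if pvCond s 2 then "vocals"
      else if pvCond s 3 then "keys" else if pvCond s 4 then "guitars"
      else if pvCond s 5 then "strings" else if pvCond s 6 then "brass"
      else if pvCond s 7 then "pads" else "other") = pvFamName n := by
  have hfalse : ∀ q, q < n → pvCond s q = false := by
    intro q hq
    by_contra hq'
    have := hmin q (by omega) (by simpa using hq')
    omega
  interval_cases n
  · rcases hmatch with h | h
    · omega
    · simp [h, pvFamName]
  · rcases hmatch with h | h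
    · omega
    · simp [hfalse 0 (by norm_num), h, pvFamName]
  · rcases hmatch with h | h
    · omega
    · simp [hfalse 0 (by norm_num), hfalse 1 (by norm_num), h, pvFamName]
  · rcases hmatch with h | h
    · omega
    · simp [hfalse 0 (by norm_num), hfalse 1 (by norm_num), hfalse 2 (by norm_num), h, pvFamName]
  · rcases hmatch with h | h
    · omega
    · simp [hfalse 0 (by norm_num), hfalse 1 (by norm_num), hfalse 2 (by norm_num),
        hfalse 3 (by norm_num), h, pvFamName]
  · rcases hmatch with h | h
    · omega
    · simp [hfalse 0 (by norm_num), hfalse 1 (by norm_num), hfalse 2 (by norm_num),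
        hfalse 3 (by norm_num), hfalse 4 (by norm_num), h, pvFamName]
  · rcases hmatch with h | h
    · omega
    · simp [hfalse 0 (by norm_num), hfalse 1 (by norm_num), hfalse 2 (by norm_num),
        hfalse 3 (by norm_num), hfalse 4 (by norm_num), hfalse 5 (by norm_num), h, pvFamName]
  · rcases hmatch with h | h
    · omega
    · simp [hfalse 0 (by norm_num), hfalse 1 (by norm_num), hfalse 2 (by norm_num),
        hfalse 3 (by norm_num), hfalse 4 (by norm_num), hfalse 5 (by norm_num),
        hfalse 6 (by norm_num), h, pvFamName]
  · simp [hfalse 0 (by norm_num), hfalse 1 (by norm_num), hfalse 2 (by norm_num),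
      hfalse 3 (by norm_num), hfalse 4 (by norm_num), hfalse 5 (by norm_num),
      hfalse 6 (by norm_num), hfalse 7 (by norm_num), pvFamName]

-- ===== VERDICT (by name: the statement is the Claim_ definition above) =====
theorem infer_stem_family_py_spec : Claim_equal_infer_stem_family_py := by
  intro instrument _
  unfold Spec_infer_stem_family_py infer_stem_family_py infer_stem_family_py_alt
  set s := PySem.Str.lower instrument with hs
  set r := ((List.range s.toList.length).foldl (pvScanIdx s.toList) (8, "other")) with hr
  have hfam : r.2 = pvFamName r.1 :=
    (pv_outer_spec s.toList (List.range s.toList.length) (8, "other") rfl).1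
  have hle8 : r.1 ≤ 8 :=
    (pv_outer_spec s.toList (List.range s.toList.length) (8, "other") rfl).2.1
  have hmatch := pv_matched s
  rw [← hr] at hmatch
  have hmin : ∀ q, q ≤ 7 → pvCond s q = true → r.1 ≤ q := by
    intro q hq hc
    have := pv_cond_le s q hq hc
    rwa [← hr] at this
  show (if pvCond s 0 then "drums" else if pvCond s 1 then "bass" else if pvCond s 2 then "vocals"
    else if pvCond s 3 then "keys" else if pvCond s 4 then "guitars"
    else if pvCond s 5 then "strings" else if pvCond s 6 then "brass"
    else if pvCond s 7 then "pads" else "other") = r.2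
  rw [hfam]
  exact pv_cascade_eq s r.1 hle8 hmatch hmin
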